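-- pv_equiv track=rewrite | github.com/ShubhamSinghal12/PythonDSAMarch2022 | Lec17/ListRecursion2.py | FO_2
-- ===== SOURCE A (Python) =====
-- def FO_2(l,n,ele):
--     if n == -1:
--         return -1
--     else:
--         ans = FO_2(l,n-1,ele)
--         if ans != -1:
--             return ans
--         elif l[n] == ele:
--             return n
--         else:
--             return -1
-- ===== SOURCE B (Python) =====
-- def FO_2(l, n, ele):
--     for i in range(n + 1):
--         if l[i] == ele:
--             return i
--     return -1
-- ===== Notes on version B (the rewrite author's own statement) =====
-- stated objective: simpler
-- what changed: Replaced the recursion that unwinds from n down to -1 with a single forward loop over range(n+1) that returns the first matching index, avoiding the O(n) call stack.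
import Mathlib
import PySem

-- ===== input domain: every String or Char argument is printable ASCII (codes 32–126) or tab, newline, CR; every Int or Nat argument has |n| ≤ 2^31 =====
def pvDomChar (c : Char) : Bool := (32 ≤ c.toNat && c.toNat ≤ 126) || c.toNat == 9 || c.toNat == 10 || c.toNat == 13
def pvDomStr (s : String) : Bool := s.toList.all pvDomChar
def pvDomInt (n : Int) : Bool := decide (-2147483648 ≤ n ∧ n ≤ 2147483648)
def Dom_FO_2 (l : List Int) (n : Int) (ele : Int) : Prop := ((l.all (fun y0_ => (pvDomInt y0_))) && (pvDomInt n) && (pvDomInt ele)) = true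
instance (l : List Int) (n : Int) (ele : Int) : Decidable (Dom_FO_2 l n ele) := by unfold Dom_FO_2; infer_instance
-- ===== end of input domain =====

-- B replaces A's recursion (which unwinds from n down to -1) with a single forward scan
-- over range(n+1) returning the first matching index; objective: simpler (no O(n) call stack).

-- ===== PORT A =====
-- Literal port of A's recursion. Python's 'if n == -1' base case is widened to 'n ≤ -1'
-- only as a totality guard (Python A recurses forever for n < -1; such n are outside Pre_).
def FO_2 (l : List Int) (n : Int) (ele : Int) : Int :=
  if n ≤ -1 then -1
  else
    let ans := FO_2 l (n - 1) ele
    if ans ≠ -1 then ans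
    else if PySem.List.pyGetD l n 0 = ele then n
    else -1
termination_by (n + 1).toNat
decreasing_by simp_wf; omega

-- ===== PORT B =====
-- helper: the body of B's for-loop with early return (first index i with l[i] == ele, else -1)
def fo2Scan (l : List Int) (ele : Int) : List Int → Int
  | [] => -1
  | i :: rest => if PySem.List.pyGetD l i 0 = ele then i else fo2Scan l ele rest

def FO_2_alt (l : List Int) (n : Int) (ele : Int) : Int :=
  fo2Scan l ele (PySem.List.pyRange 0 (n + 1) 1)

-- ===== PRECONDITION & SPEC =====
-- Pre_ excludes exactly where Python A raises: n < -1 (the recursion never reaches the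
-- base case, RecursionError) and n ≥ len(l) with ele absent from l (IndexError at l[len(l)]).
def Pre_FO_2 (l : List Int) (n : Int) (ele : Int) : Prop := -1 ≤ n ∧ (n < l.length ∨ ele ∈ l)
instance (l : List Int) (n : Int) (ele : Int) : Decidable (Pre_FO_2 l n ele) := by unfold Pre_FO_2; infer_instance

def pvWitness_FO_2 : List Int × Int × Int := ([3, 5, 7], 2, 5)

def Spec_FO_2 (l : List Int) (n : Int) (ele : Int) (out : Int) : Prop := out = FO_2_alt l n ele
instance (l : List Int) (n : Int) (ele : Int) (out : Int) : Decidable (Spec_FO_2 l n ele out) := by unfold Spec_FO_2; infer_instance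

-- ===== CLAIM (what is proved, stated in full; the proofs are below) =====
def Claim_equal_FO_2 : Prop := ∀ (l : List Int) (n : Int) (ele : Int), Dom_FO_2 l n ele → Pre_FO_2 l n ele → Spec_FO_2 l n ele (FO_2 l n ele)

-- ===== LEMMAS AND PROOFS =====

-- scanning a concatenation: if the prefix finds nothing (-1), continue with the suffix.
-- Needs the prefix's elements to be nonnegative so a found index is never confused with -1.
lemma fo2Scan_append (l : List Int) (ele : Int) (xs ys : List Int)
    (h : ∀ i ∈ xs, 0 ≤ i) :
    fo2Scan l ele (xs ++ ys) =
      if fo2Scan l ele xs = -1 then fo2Scan l ele ys else fo2Scan l ele xs := by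
  induction xs with
  | nil => simp [fo2Scan]
  | cons i xs ih =>
    have hi : 0 ≤ i := h i (List.mem_cons_self ..)
    have hxs : ∀ j ∈ xs, 0 ≤ j := fun j hj => h j (List.mem_cons_of_mem _ hj)
    by_cases hc : PySem.List.pyGetD l i 0 = ele
    · simp [fo2Scan, hc]
      omega
    · simp [fo2Scan, hc, ih hxs]

-- A equals B for every n of the form (k : Int) - 1 with k : Nat, i.e. every n ≥ -1.
lemma FO_2_eq_alt_of_nat (l : List Int) (ele : Int) :
    ∀ k : Nat, FO_2 l ((k : Int) - 1) ele = FO_2_alt l ((k : Int) - 1) ele := by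
  intro k
  induction k with
  | zero =>
    rw [FO_2]
    simp [FO_2_alt, PySem.List.pyRange_one_eq_nil, fo2Scan]
  | succ k ih =>
    have hk : ¬ ((k : Int) + 1 - 1 ≤ -1) := by omega
    rw [FO_2]
    simp only [Nat.cast_succ, hk, if_false]
    have hsplit : PySem.List.pyRange 0 ((k : Int) + 1 - 1 + 1) 1
        = PySem.List.pyRange 0 (k : Int) 1 ++ [(k : Int)] := by
      have : (k : Int) + 1 - 1 + 1 = (k : Int) + 1 := by ring
      rw [this, PySem.List.pyRange_one_succ_right (by positivity)]
    have hnn : ∀ i ∈ PySem.List.pyRange 0 (k : Int) 1, 0 ≤ i := by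
      intro i hi
      exact (PySem.List.mem_pyRange_one.mp hi).1
    have hpre : (k : Int) + 1 - 1 - 1 = (k : Int) - 1 := by ring
    rw [hpre, ih]
    unfold FO_2_alt
    rw [hsplit, fo2Scan_append l ele _ _ hnn]
    by_cases hdone : fo2Scan l ele (PySem.List.pyRange 0 ((k : Int) - 1 + 1) 1) = -1
    · have h1 : (k : Int) - 1 + 1 = (k : Int) := by ring
      rw [h1] at hdone
      have h2 : (k : Int) + 1 - 1 = (k : Int) := by ring
      simp [hdone, fo2Scan, h2]
    · have h2 : (k : Int) - 1 + 1 = (k : Int) := by ring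
      rw [h2] at hdone
      simp [hdone]

-- ===== VERDICT (by name: the statement is the Claim_ definition above) =====
theorem FO_2_spec : Claim_equal_FO_2 := by
  intro l n ele _ hpre
  unfold Spec_FO_2
  have hn : -1 ≤ n := hpre.1
  have hk : n = ((n + 1).toNat : Int) - 1 := by omega
  rw [hk]
  exact FO_2_eq_alt_of_nat l ele (n + 1).toNat
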